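-- pv_equiv track=rewrite | github.com/KubaSubub/google-ads-helper-v1 | backend/app/services/negative_conflict_service.py | _negative_blocks_positive
-- ===== SOURCE A (Python) =====
-- def _negative_blocks_positive(
--     neg_tokens: list[str], neg_match: str, pos_tokens: list[str]
-- ) -> bool:
--     if not neg_tokens or not pos_tokens:
--         return False
--     neg_match = (neg_match or "").upper()
--
--     if neg_match == "EXACT":
--         return neg_tokens == pos_tokens
--
--     if neg_match == "PHRASE":
--         # contiguous substring of tokens
--         n, p = len(neg_tokens), len(pos_tokens)
--         if n > p:
--             return False
--         for i in range(p - n + 1):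
--             if pos_tokens[i : i + n] == neg_tokens:
--                 return True
--         return False
--
--     # BROAD (and anything unexpected — be conservative and use BROAD semantics)
--     return all(t in pos_tokens for t in neg_tokens)
-- ===== SOURCE B (Python) =====
-- def _starts_with(xs, ys):
--     if len(ys) > len(xs):
--         return False
--     return all(a == b for a, b in zip(xs, ys))
--
--
-- def _negative_blocks_positive(
--     neg_tokens: list[str], neg_match: str, pos_tokens: list[str]
-- ) -> bool:
--     if not neg_tokens or not pos_tokens:
--         return False
--     m = (neg_match or "").upper()
--
--     if m == "EXACT":
--         return neg_tokens == pos_tokens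
--
--     if m == "PHRASE":
--         # walk the suffixes of pos_tokens, testing a token-wise prefix match
--         suffix = pos_tokens
--         while len(suffix) >= len(neg_tokens):
--             if _starts_with(suffix, neg_tokens):
--                 return True
--             suffix = suffix[1:]
--         return False
--
--     # BROAD: subset test on hash sets
--     return set(neg_tokens) <= set(pos_tokens)
-- ===== Notes on version B (the rewrite author's own statement) =====
-- stated objective: alternative
-- what changed: PHRASE matching walks the suffixes of pos_tokens with a token-wise prefix test instead of slicing windows out by index, and BROAD becomes a hash-set subset test instead of scanning pos_tokens once per negative token.
import Mathlib
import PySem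

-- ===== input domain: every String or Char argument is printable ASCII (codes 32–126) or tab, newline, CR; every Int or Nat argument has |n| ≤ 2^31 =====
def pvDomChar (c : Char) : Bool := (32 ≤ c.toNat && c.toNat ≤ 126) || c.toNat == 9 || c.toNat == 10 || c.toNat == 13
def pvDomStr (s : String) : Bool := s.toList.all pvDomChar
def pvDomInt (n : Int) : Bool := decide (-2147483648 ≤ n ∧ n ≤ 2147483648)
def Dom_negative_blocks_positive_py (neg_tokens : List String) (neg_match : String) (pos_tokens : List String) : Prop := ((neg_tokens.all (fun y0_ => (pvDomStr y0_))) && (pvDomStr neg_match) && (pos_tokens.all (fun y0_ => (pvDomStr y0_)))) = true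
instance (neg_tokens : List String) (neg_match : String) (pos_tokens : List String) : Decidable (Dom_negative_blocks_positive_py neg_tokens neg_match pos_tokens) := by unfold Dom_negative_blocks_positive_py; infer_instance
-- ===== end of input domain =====

-- B restructures A: PHRASE walks the suffixes of pos_tokens with a token-wise prefix
-- test instead of slicing index windows, BROAD becomes a set-subset test ("alternative").

-- ===== PORT A =====
def negative_blocks_positive_py (neg_tokens : List String) (neg_match : String) (pos_tokens : List String) : Bool :=
  if neg_tokens.isEmpty || pos_tokens.isEmpty then false
  else
    let nm := PySem.Str.upper (if neg_match == "" then "" else neg_match)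
    if nm == "EXACT" then neg_tokens == pos_tokens
    else if nm == "PHRASE" then
      let n : Int := neg_tokens.length
      let p : Int := pos_tokens.length
      if n > p then false
      else
        (PySem.List.pyRange 0 (p - n + 1) 1).any
          (fun i => PySem.List.slice pos_tokens (some i) (some (i + n)) == neg_tokens)
    else neg_tokens.all (fun t => pos_tokens.contains t)

-- ===== PORT B =====
-- _starts_with from Source B
def pvStartsWith (xs ys : List String) : Bool :=
  if ys.length > xs.length then false
  else (xs.zip ys).all (fun ab => ab.1 == ab.2)

-- the PHRASE while-loop of Source B: recursion on the current suffix
def pvScanPhrase (neg : List String) (suffix : List String) : Bool :=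
  if neg.length ≤ suffix.length then
    if pvStartsWith suffix neg then true
    else
      match suffix with
      | [] => false            -- unreachable: the loop would have returned above
      | _ :: rest => pvScanPhrase neg rest
  else false
termination_by suffix

def negative_blocks_positive_py_alt (neg_tokens : List String) (neg_match : String) (pos_tokens : List String) : Bool :=
  if neg_tokens.isEmpty || pos_tokens.isEmpty then false
  else
    let m := PySem.Str.upper (if neg_match == "" then "" else neg_match)
    if m == "EXACT" then neg_tokens == pos_tokens
    else if m == "PHRASE" then pvScanPhrase neg_tokens pos_tokens
    else PySem.Set.issubset (PySem.Set.ofList neg_tokens) (PySem.Set.ofList pos_tokens)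

-- ===== PRECONDITION & SPEC =====
def Spec_negative_blocks_positive_py (neg_tokens : List String) (neg_match : String) (pos_tokens : List String) (out : Bool) : Prop := out = negative_blocks_positive_py_alt neg_tokens neg_match pos_tokens
instance (neg_tokens : List String) (neg_match : String) (pos_tokens : List String) (out : Bool) : Decidable (Spec_negative_blocks_positive_py neg_tokens neg_match pos_tokens out) := by unfold Spec_negative_blocks_positive_py; infer_instance

-- ===== CLAIM (what is proved, stated in full; the proofs are below) =====
def Claim_equal_negative_blocks_positive_py : Prop := ∀ (neg_tokens : List String) (neg_match : String) (pos_tokens : List String), Dom_negative_blocks_positive_py neg_tokens neg_match pos_tokens → Spec_negative_blocks_positive_py neg_tokens neg_match pos_tokens (negative_blocks_positive_py neg_tokens neg_match pos_tokens)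

-- ===== LEMMAS AND PROOFS =====

lemma pvStartsWith_iff (ys : List String) : ∀ (xs : List String), ys.length ≤ xs.length →
    (pvStartsWith xs ys = true ↔ xs.take ys.length = ys) := by
  induction ys with
  | nil =>
    intro xs _
    simp [pvStartsWith]
  | cons y ys ih =>
    intro xs hlen
    cases xs with
    | nil => simp only [List.length_cons, List.length_nil] at hlen; omega
    | cons x xs =>
      simp only [List.length_cons, Nat.add_le_add_iff_right] at hlen
      have hx : pvStartsWith (x :: xs) (y :: ys) = ((x == y) && (xs.zip ys).all (fun ab => ab.1 == ab.2)) := by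
        rw [pvStartsWith, if_neg]
        · rfl
        · simp only [List.length_cons]
          omega
      have hx' : pvStartsWith xs ys = (xs.zip ys).all (fun ab => ab.1 == ab.2) := by
        rw [pvStartsWith, if_neg (Nat.not_lt.mpr hlen)]
      rw [hx]
      constructor
      · intro h
        simp only [Bool.and_eq_true, beq_iff_eq] at h
        obtain ⟨hxy, hall⟩ := h
        have := (ih xs hlen).mp (by rw [hx']; exact hall)
        simp [hxy, this]
      · intro h
        simp only [List.length_cons, List.take_succ_cons, List.cons_eq_cons] at h
        obtain ⟨hxy, htk⟩ := h
        have := (ih xs hlen).mpr htk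
        rw [hx'] at this
        simp [hxy, this]

lemma pvScanPhrase_iff (neg : List String) : ∀ (pos : List String),
    (pvScanPhrase neg pos = true ↔
      ∃ j : Nat, j + neg.length ≤ pos.length ∧ (pos.drop j).take neg.length = neg) := by
  intro pos
  induction pos with
  | nil =>
    rw [pvScanPhrase]
    by_cases hn : neg = []
    · subst hn
      simp [pvStartsWith]
    · have hh : ¬ neg.length ≤ ([] : List String).length := by
        simp only [List.length_nil, Nat.le_zero, List.length_eq_zero_iff]
        exact hn
      rw [if_neg hh]
      simp only [Bool.false_eq_true, false_iff]
      rintro ⟨j, hj, _⟩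
      simp only [List.length_nil] at hj
      exact hn (List.length_eq_zero_iff.mp (by omega))
  | cons x xs ih =>
    rw [pvScanPhrase]
    by_cases hlen : neg.length ≤ (x :: xs).length
    · rw [if_pos hlen]
      by_cases hsw : pvStartsWith (x :: xs) neg = true
      · rw [if_pos hsw]
        simp only [true_iff]
        exact ⟨0, by simpa using hlen, by simpa using (pvStartsWith_iff neg (x :: xs) hlen).mp hsw⟩
      · rw [if_neg hsw]
        show pvScanPhrase neg xs = true ↔ _
        rw [ih]
        constructor
        · rintro ⟨j, hj, htk⟩
          exact ⟨j + 1, by simp only [List.length_cons]; omega, by simpa using htk⟩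
        · rintro ⟨j, hj, htk⟩
          cases j with
          | zero =>
            exact absurd ((pvStartsWith_iff neg (x :: xs) hlen).mpr (by simpa using htk)) hsw
          | succ j =>
            exact ⟨j, by simp only [List.length_cons] at hj; omega, by simpa using htk⟩
    · rw [if_neg hlen]
      simp only [Bool.false_eq_true, false_iff]
      rintro ⟨j, hj, _⟩
      exact hlen (by omega)

lemma phrase_eq (neg pos : List String) :
    (if ((neg.length : Int) > (pos.length : Int)) then false
     else
       (PySem.List.pyRange 0 ((pos.length : Int) - (neg.length : Int) + 1) 1).any
         (fun i => PySem.List.slice pos (some i) (some (i + (neg.length : Int))) == neg))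
    = pvScanPhrase neg pos := by
  by_cases hnp : (neg.length : Int) > (pos.length : Int)
  · rw [if_pos hnp, pvScanPhrase.eq_def, if_neg (by omega : ¬ neg.length ≤ pos.length)]
  · rw [if_neg hnp]
    rw [Bool.eq_iff_iff, List.any_eq_true, pvScanPhrase_iff]
    constructor
    · rintro ⟨i, hmem, hslice⟩
      rw [PySem.List.mem_pyRange_one] at hmem
      obtain ⟨h0, hlt⟩ := hmem
      lift i to ℕ using h0 with j
      refine ⟨j, by omega, ?_⟩
      rw [PySem.List.slice_natCast_add] at hslice
      exact beq_iff_eq.mp hslice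
    · rintro ⟨j, hj, htk⟩
      refine ⟨(j : Int), ?_, ?_⟩
      · rw [PySem.List.mem_pyRange_one]
        constructor <;> omega
      · rw [PySem.List.slice_natCast_add]
        exact beq_iff_eq.mpr htk

lemma broad_eq (neg pos : List String) :
    neg.all (fun t => pos.contains t) =
      PySem.Set.issubset (PySem.Set.ofList neg) (PySem.Set.ofList pos) := by
  rw [Bool.eq_iff_iff, List.all_eq_true, PySem.Set.issubset_iff]
  constructor
  · intro h x hx
    rw [PySem.Set.mem_ofList] at hx ⊢
    simpa using h x hx
  · intro h t ht
    have := h t ((PySem.Set.mem_ofList neg t).mpr ht)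
    rw [PySem.Set.mem_ofList] at this
    simpa using this

-- ===== VERDICT (by name: the statement is the Claim_ definition above) =====
theorem negative_blocks_positive_py_spec : Claim_equal_negative_blocks_positive_py := by
  intro neg nm pos _
  unfold Spec_negative_blocks_positive_py
  simp only [negative_blocks_positive_py, negative_blocks_positive_py_alt]
  by_cases hg : (neg.isEmpty || pos.isEmpty) = true
  · rw [if_pos hg, if_pos hg]
  · rw [if_neg hg, if_neg hg]
    by_cases he : (PySem.Str.upper (if nm == "" then "" else nm) == "EXACT") = true
    · rw [if_pos he, if_pos he]
    · rw [if_neg he, if_neg he]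
      by_cases hp : (PySem.Str.upper (if nm == "" then "" else nm) == "PHRASE") = true
      · rw [if_pos hp, if_pos hp]
        exact phrase_eq neg pos
      · rw [if_neg hp, if_neg hp]
        exact broad_eq neg pos
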